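-- pv_equiv track=rewrite | github.com/trmmo/Code_PTIT_Python | PY01041.py | check
-- ===== SOURCE A (Python) =====
-- def check(n):
--     pos = -1
--     for i in range(0, len(n) - 1):
--         if n[i] == n[i + 1]:
--             return False
--         if ord(n[i]) > ord(n[i + 1]):
--             pos = i
--             break
--     if pos == 0 or pos == -1:
--         return False
--     for i in range(pos, len(n) - 1):
--         if ord(n[i]) < ord(n[i + 1]):
--             return False
--     return True
-- ===== SOURCE B (Python) =====
-- def check(n):
--     if not n:
--         return False
--     mx = max(n)
--     m = n.index(mx)
--     pre, suf = n[:m + 1], n[m:]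
--     return (n.count(mx) == 1
--             and 0 < m < len(n) - 1
--             and sorted(set(pre)) == list(pre)
--             and sorted(suf, reverse=True) == list(suf))
-- ===== Notes on version B (the rewrite author's own statement) =====
-- stated objective: alternative
-- what changed: Replaced A's two sequential index loops (scan for the peak, then validate the descent) by a global characterization: the peak is the unique maximum character, located with max/index and checked with count, and the two halves are validated by comparing them against sorted(set(prefix)) and sorted(suffix, reverse=True).
import Mathlib
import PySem

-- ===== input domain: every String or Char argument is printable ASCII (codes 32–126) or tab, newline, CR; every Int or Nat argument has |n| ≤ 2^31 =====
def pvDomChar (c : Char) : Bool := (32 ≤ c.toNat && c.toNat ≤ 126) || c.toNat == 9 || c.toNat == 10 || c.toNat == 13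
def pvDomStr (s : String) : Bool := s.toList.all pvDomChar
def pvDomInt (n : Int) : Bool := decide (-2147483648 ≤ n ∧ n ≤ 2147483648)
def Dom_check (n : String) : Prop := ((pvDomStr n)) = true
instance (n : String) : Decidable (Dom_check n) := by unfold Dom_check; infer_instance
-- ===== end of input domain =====

-- B replaces A's scan by a global characterization: the peak is the unique maximum character
-- (max/index/count) and the two halves are validated by comparing them with their sorts (alternative algorithm).

-- ===== PORT A =====
-- first loop: walk adjacent pairs tracking the absolute index i;
-- none = early `return False` (equal pair), some none = loop ended (pos = -1), some (some p) = break with pos = p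
def checkLoop1 : List Char → Nat → Option (Option Nat)
  | a :: b :: rest, i =>
      if a = b then none
      else if b < a then some (some i)
      else checkLoop1 (b :: rest) (i + 1)
  | _, _ => some none

-- second loop: from pos, reject any strictly increasing adjacent pair
def checkLoop2 : List Char → Bool
  | a :: b :: rest => if a < b then false else checkLoop2 (b :: rest)
  | _ => true

def check (n : String) : Bool :=
  match checkLoop1 n.toList 0 with
  | none => false
  | some none => false               -- pos == -1
  | some (some p) =>
      if p = 0 then false            -- pos == 0
      else checkLoop2 (n.toList.drop p)

-- ===== PORT B =====
-- m = n.index(max(n)); valid iff the max is unique, strictly inside, n[:m+1] equals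
-- sorted(set(n[:m+1])) (strictly increasing) and n[m:] equals sorted(n[m:], reverse=True) (non-increasing)
def check_alt (n : String) : Bool :=
  if n.toList = [] then false
  else
    match PySem.List.max? n.toList (fun x => x) with
    | none => false                  -- unreachable: the string is nonempty
    | some mx =>
      match PySem.List.index? n.toList mx with
      | none => false                -- unreachable: mx ∈ n
      | some m =>
        decide (PySem.List.count n.toList mx = 1) &&
        decide (0 < m) && decide (m < n.toList.length - 1) &&
        decide (PySem.List.sorted (PySem.Set.ofList (PySem.List.slice n.toList none (some ((m : Int) + 1)))) (fun x => x) false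
                  = PySem.List.slice n.toList none (some ((m : Int) + 1))) &&
        decide (PySem.List.sorted (PySem.List.slice n.toList (some (m : Int)) none) (fun x => x) true
                  = PySem.List.slice n.toList (some (m : Int)) none)

-- ===== PRECONDITION & SPEC =====
def Spec_check (n : String) (out : Bool) : Prop := out = check_alt n
instance (n : String) (out : Bool) : Decidable (Spec_check n out) := by unfold Spec_check; infer_instance

-- ===== CLAIM (what is proved, stated in full; the proofs are below) =====
def Claim_equal_check : Prop := ∀ (n : String), Dom_check n → Spec_check n (check n)

-- ===== LEMMAS AND PROOFS =====

-- the common characterization: cs = l ++ x :: y :: r with a nonempty strictly increasing l ++ [x],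
-- a strict descent x > y, and a non-increasing y :: r
def Bitonic (cs : List Char) : Prop :=
  ∃ l x y r, cs = l ++ x :: y :: r ∧ l ≠ [] ∧
    (l ++ [x]).Pairwise (· < ·) ∧ y < x ∧ (y :: r).Pairwise (fun a b => b ≤ a)

theorem head_lt_next {c b x y : Char} {l' rest r : List Char}
    (hpw : ((c :: l') ++ [x]).Pairwise (· < ·))
    (heq : l' ++ x :: y :: r = b :: rest) : c < b := by
  have h1 : ∀ z ∈ l' ++ [x], c < z := (List.pairwise_cons.mp hpw).1
  cases l' with
  | nil =>
    injection heq with h2 _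
    subst h2
    exact h1 _ (by simp)
  | cons d l'' =>
    injection heq with h2 _
    subst h2
    exact h1 _ (by simp)

theorem all_gt_head {a b x y : Char} {l' rest r : List Char}
    (hab : a < b) (heq : l' ++ x :: y :: r = b :: rest)
    (hpw : (l' ++ [x]).Pairwise (· < ·)) : ∀ z ∈ l' ++ [x], a < z := by
  cases l' with
  | nil =>
    injection heq with h2 _
    subst h2
    intro z hz
    simp at hz
    subst hz
    exact hab
  | cons c l'' =>
    injection heq with h2 _
    subst h2
    intro z hz
    rcases List.mem_cons.mp hz with rfl | hz'
    · exact hab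
    · exact lt_trans hab ((List.pairwise_cons.mp hpw).1 z hz')

theorem loop2_iff (cs : List Char) :
    checkLoop2 cs = true ↔ cs.Pairwise (fun a b : Char => b ≤ a) := by
  induction cs with
  | nil => simp [checkLoop2]
  | cons a t ih =>
    cases t with
    | nil => simp [checkLoop2]
    | cons b rest =>
      by_cases h : a < b
      · simp only [checkLoop2, if_pos h]
        constructor
        · intro hf; exact absurd hf (by simp)
        · intro hp; exact absurd ((List.pairwise_cons.mp hp).1 b (by simp)) (not_le.mpr h)
      · simp only [checkLoop2, if_neg h]
        rw [ih]
        constructor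
        · intro hp
          refine List.pairwise_cons.mpr ⟨?_, hp⟩
          intro z hz
          rcases List.mem_cons.mp hz with rfl | hz'
          · exact not_lt.mp h
          · exact le_trans ((List.pairwise_cons.mp hp).1 z hz') (not_lt.mp h)
        · intro hp; exact (List.pairwise_cons.mp hp).2

theorem loop1_some_iff (cs : List Char) : ∀ i p,
    checkLoop1 cs i = some (some p) ↔
      ∃ l x y r, cs = l ++ x :: y :: r ∧ p = i + l.length ∧
        (l ++ [x]).Pairwise (· < ·) ∧ y < x := by
  induction cs with
  | nil =>
    intro i p
    constructor
    · intro h; simp [checkLoop1] at h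
    · rintro ⟨l, x, y, r, hcs, -, -, -⟩
      exact absurd hcs (by simp)
  | cons a t ih =>
    cases t with
    | nil =>
      intro i p
      constructor
      · intro h; simp [checkLoop1] at h
      · rintro ⟨l, x, y, r, hcs, -, -, -⟩
        have := congrArg List.length hcs
        simp at this
        omega
    | cons b rest =>
      intro i p
      by_cases hab : a = b
      · constructor
        · intro h; simp [checkLoop1, hab] at h
        · rintro ⟨l, x, y, r, hcs, hp, hpw, hyx⟩
          exfalso
          cases l with
          | nil =>
            simp at hcs
            obtain ⟨rfl, rfl, -⟩ := hcs
            exact absurd hyx (by rw [hab]; exact lt_irrefl b)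
          | cons c l' =>
            injection hcs with h1 h2
            subst h1
            exact absurd (head_lt_next hpw h2.symm) (by rw [hab]; exact lt_irrefl b)
      · by_cases hba : b < a
        · constructor
          · intro h
            simp only [checkLoop1, if_neg hab, if_pos hba] at h
            have hip : i = p := by
              injection h with h'; injection h' with h''
            subst hip
            exact ⟨[], a, b, rest, rfl, by simp, by simp, hba⟩
          · rintro ⟨l, x, y, r, hcs, hp, hpw, hyx⟩
            simp only [checkLoop1, if_neg hab, if_pos hba]
            cases l with
            | nil =>
              simp at hcs
              obtain ⟨rfl, rfl, -⟩ := hcs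
              simp at hp
              subst hp
              rfl
            | cons c l' =>
              injection hcs with h1 h2
              subst h1
              exact absurd (head_lt_next hpw h2.symm) (fun h => lt_asymm hba h)
        · have hlt : a < b := lt_of_le_of_ne (not_lt.mp hba) hab
          simp only [checkLoop1, if_neg hab, if_neg hba]
          rw [ih (i + 1) p]
          constructor
          · rintro ⟨l', x, y, r, hcs, hp, hpw, hyx⟩
            refine ⟨a :: l', x, y, r, by rw [List.cons_append, ← hcs], ?_, ?_, hyx⟩
            · simp only [List.length_cons]
              omega
            · exact List.pairwise_cons.mpr ⟨all_gt_head hlt hcs.symm hpw, hpw⟩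
          · rintro ⟨l, x, y, r, hcs, hp, hpw, hyx⟩
            cases l with
            | nil =>
              exfalso
              simp at hcs
              obtain ⟨rfl, rfl, -⟩ := hcs
              exact absurd hyx hba
            | cons c l' =>
              injection hcs with h1 h2
              subst h1
              refine ⟨l', x, y, r, h2, ?_, (List.pairwise_cons.mp hpw).2, hyx⟩
              simp only [List.length_cons] at hp
              omega

theorem checkA_iff (n : String) : check n = true ↔ Bitonic n.toList := by
  cases hc : checkLoop1 n.toList 0 with
  | none =>
    simp only [check, hc]
    constructor
    · intro h; simp at h
    · rintro ⟨l, x, y, r, hcs, -, hpw, hyx, -⟩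
      have := (loop1_some_iff n.toList 0 (0 + l.length)).mpr ⟨l, x, y, r, hcs, rfl, hpw, hyx⟩
      rw [hc] at this
      simp at this
  | some o =>
    cases o with
    | none =>
      simp only [check, hc]
      constructor
      · intro h; simp at h
      · rintro ⟨l, x, y, r, hcs, -, hpw, hyx, -⟩
        have := (loop1_some_iff n.toList 0 (0 + l.length)).mpr ⟨l, x, y, r, hcs, rfl, hpw, hyx⟩
        rw [hc] at this
        simp at this
    | some p =>
      obtain ⟨l, x, y, r, hcs, hp, hpw, hyx⟩ := (loop1_some_iff n.toList 0 p).mp hc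
      simp only [Nat.zero_add] at hp
      by_cases hp0 : p = 0
      · simp only [check, hc, if_pos hp0]
        constructor
        · intro h; simp at h
        · rintro ⟨l₂, x₂, y₂, r₂, hcs₂, hl₂, hpw₂, hyx₂, -⟩
          have h2 := (loop1_some_iff n.toList 0 (0 + l₂.length)).mpr ⟨l₂, x₂, y₂, r₂, hcs₂, rfl, hpw₂, hyx₂⟩
          rw [hc] at h2
          injection h2 with h2
          injection h2 with h2
          have : l₂ = [] := List.length_eq_zero_iff.mp (by omega)
          exact absurd this hl₂
      · simp only [check, hc, if_neg hp0]
        have hl : l ≠ [] := by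
          intro h
          apply hp0
          rw [hp, h]
          rfl
        have hdrop : n.toList.drop p = x :: y :: r := by
          rw [hcs, hp]
          exact List.drop_left
        rw [hdrop, loop2_iff]
        constructor
        · intro h2
          exact ⟨l, x, y, r, hcs, hl, hpw, hyx, (List.pairwise_cons.mp h2).2⟩
        · rintro ⟨l₂, x₂, y₂, r₂, hcs₂, -, hpw₂, hyx₂, htail₂⟩
          have h2 := (loop1_some_iff n.toList 0 (0 + l₂.length)).mpr ⟨l₂, x₂, y₂, r₂, hcs₂, rfl, hpw₂, hyx₂⟩
          rw [hc] at h2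
          injection h2 with h2
          injection h2 with h2
          have hlen : l.length = l₂.length := by omega
          have heq : l ++ x :: y :: r = l₂ ++ x₂ :: y₂ :: r₂ := by rw [← hcs, ← hcs₂]
          obtain ⟨-, htl⟩ := List.append_inj heq hlen
          injection htl with he1 htl
          injection htl with he2 htl
          subst he1
          subst he2
          subst htl
          refine List.pairwise_cons.mpr ⟨?_, htail₂⟩
          intro z hz
          rcases List.mem_cons.mp hz with rfl | hz'
          · exact le_of_lt hyx₂
          · exact le_trans ((List.pairwise_cons.mp htail₂).1 z hz') (le_of_lt hyx₂)

theorem checkB_iff (n : String) : check_alt n = true ↔ Bitonic n.toList := by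
  by_cases hnil : n.toList = []
  · simp only [check_alt, if_pos hnil]
    constructor
    · intro h; simp at h
    · rintro ⟨l, x, y, r, hcs, -, -, -, -⟩
      rw [hnil] at hcs
      exact absurd hcs.symm (by simp)
  · obtain ⟨mx, hmx⟩ : ∃ mx, PySem.List.max? n.toList (fun x => x) = some mx := by
      cases h : PySem.List.max? n.toList (fun x => x) with
      | none => exact absurd ((PySem.List.max?_eq_none_iff _ _).mp h) hnil
      | some mx => exact ⟨mx, rfl⟩
    have hmem : mx ∈ n.toList := PySem.List.max?_mem hmx
    have hmax : ∀ z ∈ n.toList, z ≤ mx := fun z hz => PySem.List.max?_isMax hmx z hz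
    obtain ⟨m, hidx⟩ : ∃ m, PySem.List.index? n.toList mx = some m := by
      have := (PySem.List.index?_isSome_iff (xs := n.toList) (v := mx)).mpr hmem
      exact Option.isSome_iff_exists.mp this
    have hpre : PySem.List.slice n.toList none (some ((m : Int) + 1)) = n.toList.take (m + 1) := by
      have h1 : ((m : Int) + 1) = ((m + 1 : Nat) : Int) := by push_cast; ring
      rw [h1, PySem.List.slice_to]
      · simp
      · omega
    have hsuf : PySem.List.slice n.toList (some (m : Int)) none = n.toList.drop m := by
      rw [PySem.List.slice_from]
      · simp
      · omega
    simp only [check_alt, if_neg hnil, hmx, hidx]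
    rw [hpre, hsuf]
    simp only [Bool.and_eq_true, decide_eq_true_eq, and_assoc]
    have hpreIff : (PySem.List.sorted (PySem.Set.ofList (n.toList.take (m + 1))) (fun x => x) false = n.toList.take (m + 1))
        ↔ (n.toList.take (m + 1)).Pairwise (· < ·) := by
      constructor
      · intro h
        have h2 := PySem.List.sorted_ofList_pairwise_lt (xs := n.toList.take (m + 1))
        rw [h] at h2
        exact h2
      · intro h
        rw [PySem.Set.ofList_eq_self_of_nodup _ (h.imp ne_of_lt)]
        exact PySem.List.sorted_eq_of_perm_of_pairwise_lt _ _ _ (List.Perm.refl _) h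
    have hsufIff : (PySem.List.sorted (n.toList.drop m) (fun x => x) true = n.toList.drop m)
        ↔ (n.toList.drop m).Pairwise (fun a b : Char => b ≤ a) := by
      constructor
      · intro h
        have h2 := PySem.List.sorted_pairwise_rev (xs := n.toList.drop m) (key := fun x => x)
        rw [h] at h2
        exact h2
      · intro h
        exact PySem.List.sorted_rev_eq_self_of_pairwise _ _ h
    rw [hpreIff, hsufIff, PySem.List.count_eq]
    constructor
    · rintro ⟨h1, h2, h3, h4, h5⟩
      obtain ⟨l, suf', hcs, hlen, hnotmem⟩ := (PySem.List.index?_eq_some_iff _ _ _).mp hidx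
      have hl : l ≠ [] := by
        intro h
        rw [h] at hlen
        simp at hlen
        omega
      cases suf' with
      | nil =>
        exfalso
        have := congrArg List.length hcs
        simp only [List.length_append, List.length_cons, List.length_nil] at this
        omega
      | cons y r =>
        have htake : n.toList.take (m + 1) = l ++ [mx] := by
          rw [hcs, ← hlen, List.take_length_add_append 1]
          rfl
        have hdrop : n.toList.drop m = mx :: y :: r := by
          rw [hcs, ← hlen]
          exact List.drop_left
        rw [htake] at h4
        rw [hdrop] at h5
        have hcnt : (y :: r).count mx = 0 := by
          have hc2 : n.toList.count mx = l.count mx + ((y :: r).count mx + 1) := by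
            rw [hcs, List.count_append, List.count_cons_self]
          omega
        have hyne : y ≠ mx := fun h => (List.count_eq_zero.mp hcnt) (h ▸ (by simp : y ∈ y :: r))
        have hyle : y ≤ mx := (List.pairwise_cons.mp h5).1 y (by simp)
        exact ⟨l, mx, y, r, hcs, hl, h4, lt_of_le_of_ne hyle hyne, (List.pairwise_cons.mp h5).2⟩
    · rintro ⟨l, x, y, r, hcs, hl, hpw, hyx, htail⟩
      have hallt : ∀ z ∈ l, z < x := by
        have h := List.pairwise_append.mp hpw
        intro z hz
        exact h.2.2 z hz x (by simp)
      have hsuflt : ∀ z ∈ y :: r, z < x := by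
        intro z hz
        rcases List.mem_cons.mp hz with rfl | hz'
        · exact hyx
        · exact lt_of_le_of_lt ((List.pairwise_cons.mp htail).1 z hz') hyx
      have hxle : x ≤ mx := hmax x (by rw [hcs]; simp)
      have hmxeq : mx = x := by
        have h := hmem
        rw [hcs] at h
        rcases List.mem_append.mp h with h' | h'
        · exact absurd hxle (not_le.mpr (hallt mx h'))
        · rcases List.mem_cons.mp h' with h'' | h''
          · exact h''
          · exact absurd hxle (not_le.mpr (hsuflt mx h''))
      subst hmxeq
      have hidx2 : PySem.List.index? n.toList mx = some l.length := by
        rw [hcs]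
        exact (PySem.List.index?_eq_some_iff _ _ _).mpr ⟨l, y :: r, rfl, rfl, fun hm' => lt_irrefl mx (hallt mx hm')⟩
      have hm : m = l.length := by
        have h := hidx.symm.trans hidx2
        injection h
      subst hm
      refine ⟨?_, ?_, ?_, ?_, ?_⟩
      · rw [hcs, List.count_append, List.count_cons_self,
            List.count_eq_zero.mpr (fun h => lt_irrefl mx (hallt mx h)),
            List.count_eq_zero.mpr (fun h => lt_irrefl mx (hsuflt mx h))]
      · exact List.length_pos_iff.mpr hl
      · rw [hcs]
        simp only [List.length_append, List.length_cons]
        omega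
      · have h : n.toList.take (l.length + 1) = l ++ [mx] := by
          rw [hcs, List.take_length_add_append 1]
          rfl
        rw [h]
        exact hpw
      · have h : n.toList.drop l.length = mx :: y :: r := by
          rw [hcs]
          exact List.drop_left
        rw [h]
        exact List.pairwise_cons.mpr ⟨fun z hz => le_of_lt (hsuflt z hz), htail⟩

-- ===== VERDICT (by name: the statement is the Claim_ definition above) =====
theorem check_spec : Claim_equal_check := by
  intro n _
  unfold Spec_check
  have hA := checkA_iff n
  have hB := checkB_iff n
  cases hcb : check_alt n <;> cases hca : check n <;> simp_all
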